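-- pv_equiv track=rewrite | github.com/LylianaSousa/Principio_de_Desenvolvimento_de_Algoritmo | pilha.py | precedente
-- ===== SOURCE A (Python) =====
-- operadores = ['+','-','*','/','**']
--
-- def precedente(c):
--     resultado = 0
--
--     for i in operadores:
--         resultado += 1
--
--         if i == c:
--             if c in '-/':
--                 resultado -= 1
--             break
--
--     return resultado
-- ===== SOURCE B (Python) =====
-- def precedente(c):
--     # Branch-free arithmetic: start at 5 and subtract tier demotions.
--     return 5 - 4 * (c in ('+', '-')) - 2 * (c in ('*', '/'))
-- ===== Notes on version B (the rewrite author's own statement) =====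
-- stated objective: simpler
-- what changed: Replaces the counting loop with break and '-'/'/' demotion by a branch-free closed-form arithmetic expression: 5 minus 4 if the character is additive minus 2 if multiplicative.
import Mathlib
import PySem

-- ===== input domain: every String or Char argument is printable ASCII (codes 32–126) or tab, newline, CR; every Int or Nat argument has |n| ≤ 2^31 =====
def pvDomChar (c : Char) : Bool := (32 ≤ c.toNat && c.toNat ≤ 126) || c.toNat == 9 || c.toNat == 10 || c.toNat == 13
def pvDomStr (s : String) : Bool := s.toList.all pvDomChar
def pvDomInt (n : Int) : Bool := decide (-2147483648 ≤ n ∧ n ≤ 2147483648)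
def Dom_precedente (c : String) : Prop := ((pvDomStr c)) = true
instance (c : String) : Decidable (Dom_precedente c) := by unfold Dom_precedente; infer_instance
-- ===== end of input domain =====

-- B replaces A's counting loop (with break and '-'/'/' demotion) by a branch-free
-- closed-form arithmetic expression over two membership tests (simpler).
-- ===== PORT A =====
def operadores : List String := ["+", "-", "*", "/", "**"]

def precedenteLoop (c : String) : List String → Int → Int
  | [], resultado => resultado
  | i :: rest, resultado =>
      let resultado := resultado + 1
      if i == c then
        (if PySem.Str.isIn c "-/" then resultado - 1 else resultado)
      else precedenteLoop c rest resultado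

def precedente (c : String) : Int := precedenteLoop c operadores 0

-- ===== PORT B =====
def precedente_alt (c : String) : Int :=
  5 - 4 * (if c = "+" ∨ c = "-" then (1 : Int) else 0)
    - 2 * (if c = "*" ∨ c = "/" then (1 : Int) else 0)

-- ===== PRECONDITION & SPEC =====
def Spec_precedente (c : String) (out : Int) : Prop := out = precedente_alt c
instance (c : String) (out : Int) : Decidable (Spec_precedente c out) := by unfold Spec_precedente; infer_instance

-- ===== CLAIM (what is proved, stated in full; the proofs are below) =====
def Claim_equal_precedente : Prop := ∀ (c : String), Dom_precedente c → Spec_precedente c (precedente c)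

-- ===== LEMMAS AND PROOFS =====

-- ===== VERDICT (by name: the statement is the Claim_ definition above) =====
theorem precedente_spec : Claim_equal_precedente := by
  intro c _
  unfold Spec_precedente
  by_cases h1 : "+" = c
  · subst h1; decide
  by_cases h2 : "-" = c
  · subst h2; decide
  by_cases h3 : "*" = c
  · subst h3; decide
  by_cases h4 : "/" = c
  · subst h4; decide
  by_cases h5 : "**" = c
  · subst h5; decide
  simp [precedente, precedenteLoop, operadores, precedente_alt,
    h1, h2, h3, h4, h5, Ne.symm h1, Ne.symm h2, Ne.symm h3, Ne.symm h4]
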